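-- pv_equiv track=rewrite | github.com/k-harada/AtCoder | ABC/ABC151-200/ABC177/E.py | solve
-- ===== SOURCE A (Python) =====
-- def gcd(x, y):
--     while y:
--         x, y = y, x % y
--     return x
--
-- def solve(n, a_list):
--
--     # set-wise co-prime
--     r = a_list[0]
--     for i in range(1, n):
--         r = gcd(r, a_list[i])
--     if r != 1:
--         return 'not coprime'
--
--     # prime factorization
--     # list primes
--     primes_1st = list(range(10 ** 6 + 1))
--     for p in range(2, 10 ** 3):
--         if primes_1st[p] == p:
--             for q in range(p * p, 10 ** 6 + 1, p):
--                 primes_1st[q] = p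
--
--     primes_count = [0] * (10 ** 6 + 1)
--     for i in range(n):
--         a = a_list[i]
--         prime_factors = []
--         while a > 1:
--             prime_factors.append(primes_1st[a])
--             a = a // primes_1st[a]
--         for p in set(prime_factors):
--             primes_count[p] += 1
--     if max(primes_count) > 1:
--         return 'setwise coprime'
--     else:
--         return 'pairwise coprime'
-- ===== SOURCE B (Python) =====
-- def _gcd(x, y):
--     return x if y == 0 else _gcd(y, x % y)
--
--
-- def _prime_factors(a):
--     fs = set()
--     d = 2
--     while d * d <= a:
--         if a % d == 0:
--             fs.add(d)
--             while a % d == 0: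
--                 a //= d
--         d += 1
--     if a > 1:
--         fs.add(a)
--     return fs
--
--
-- def solve(n, a_list):
--     g = a_list[0]
--     for i in range(1, n):
--         g = _gcd(g, a_list[i])
--     if g != 1:
--         return 'not coprime'
--     seen = set()
--     shared = False
--     for i in range(n):
--         for p in _prime_factors(a_list[i]):
--             if p in seen:
--                 shared = True
--             seen.add(p)
--     return 'setwise coprime' if shared else 'pairwise coprime'
-- ===== Notes on version B (the rewrite author's own statement) =====
-- stated objective: alternative
-- what changed: B keeps the overall-gcd guard but replaces A's 10^6 smallest-prime-factor sieve plus a 10^6-entry occurrence-count array (finished by max()) with per-element trial-division factorization and a single global set of primes already seen, setting a shared flag on the first repeat.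
-- outside the precondition, e.g. on solve(2, [2000000, -1]): A returns 'not coprime', B returns 'not coprime'
import Mathlib
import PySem

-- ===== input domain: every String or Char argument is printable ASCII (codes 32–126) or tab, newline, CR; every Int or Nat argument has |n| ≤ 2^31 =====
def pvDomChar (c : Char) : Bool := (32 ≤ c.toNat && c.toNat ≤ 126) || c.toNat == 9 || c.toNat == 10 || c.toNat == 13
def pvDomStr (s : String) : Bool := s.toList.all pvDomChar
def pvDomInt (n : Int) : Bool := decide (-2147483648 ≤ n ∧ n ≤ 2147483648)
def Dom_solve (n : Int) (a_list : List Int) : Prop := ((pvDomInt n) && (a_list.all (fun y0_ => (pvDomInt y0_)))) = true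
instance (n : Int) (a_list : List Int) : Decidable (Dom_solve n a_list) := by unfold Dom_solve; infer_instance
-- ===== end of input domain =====

-- B replaces A's 10^6 smallest-prime-factor sieve and 10^6-entry occurrence-count array by
-- per-element trial division with one global seen-set of primes (objective: alternative algorithm).

-- ===== PORT A =====
-- Python's hand-written gcd: `while y: x, y = y, x % y; return x` (floor mod).
def pyGcd (x y : Int) : Int :=
  if y = 0 then x else pyGcd y (PySem.Int.mod x y)
  termination_by y.natAbs
  decreasing_by
    rename_i h
    rcases lt_or_gt_of_ne h with hy | hy
    · have := PySem.Int.mod_neg_bounds x hy; omega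
    · have h1 := PySem.Int.mod_nonneg x hy; have h2 := PySem.Int.mod_lt x hy; omega

-- inner sieve loop `for q in range(p*p, 10**6+1, p): primes_1st[q] = p` (the Python list is
-- array-backed, ported as Array; all values A stores/compares here are nonnegative ints = Nat)
def sieveInner (arr : Array Nat) (p : Nat) : Array Nat :=
  (PySem.List.pyRange ((p : Int) * p) 1000001 p).foldl (fun a q => a.setIfInBounds q.toNat p) arr

-- one step of `for p in range(2, 10**3): if primes_1st[p] == p: ...`
def sieveStep (arr : Array Nat) (pI : Int) : Array Nat :=
  if arr.getD pI.toNat 0 = pI.toNat then sieveInner arr pI.toNat else arr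

-- `primes_1st = list(range(10**6+1))` followed by the two sieve loops (input-independent, hoisted)
def sieveA : Array Nat :=
  (PySem.List.pyRange 2 1000 1).foldl sieveStep (Array.range 1000001)

-- `prime_factors = []; while a > 1: prime_factors.append(primes_1st[a]); a = a // primes_1st[a]`
-- with structural fuel a (ample: each step divides by ≥ 2); the body only runs for a ≥ 2
def collectA (arr : Array Nat) : Nat → Nat → List Nat
  | 0, _ => []
  | fuel + 1, a =>
    if 1 < a then arr.getD a 0 :: collectA arr fuel (a / arr.getD a 0) else []

-- body of `for i in range(n): ... for p in set(prime_factors): primes_count[p] += 1`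
def countStep (a_list : List Int) (cnt : Array Nat) (i : Int) : Array Nat :=
  let a := PySem.List.pyGetD a_list i 0
  (PySem.Set.ofList (collectA sieveA a.toNat a.toNat)).foldl
    (fun c p => c.setIfInBounds p (c.getD p 0 + 1)) cnt

def solve (n : Int) (a_list : List Int) : String :=
  match a_list with
  | [] => ""  -- Python: a_list[0] raises IndexError here (outside Pre_solve)
  | a0 :: _ =>
    if ((PySem.List.pyRange 1 n 1).foldl
        (fun r i => pyGcd r (PySem.List.pyGetD a_list i 0)) a0) ≠ 1 then "not coprime"
    else
      -- `max(primes_count)`: fold of max over the nonempty all-nonnegative counts;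
      -- primes_count[0] = 0 always, so folding from 0 is the same value
      if 1 < ((PySem.List.pyRange 0 n 1).foldl (countStep a_list)
          (Array.replicate 1000001 0)).foldl max 0
      then "setwise coprime" else "pairwise coprime"

-- ===== PORT B =====
-- Source B `_gcd(x, y): return x if y == 0 else _gcd(y, x % y)`
def pyGcdAlt (x y : Int) : Int :=
  if y = 0 then x else pyGcdAlt y (PySem.Int.mod x y)
  termination_by y.natAbs
  decreasing_by
    rename_i h
    rcases lt_or_gt_of_ne h with hy | hy
    · have := PySem.Int.mod_neg_bounds x hy; omega
    · have h1 := PySem.Int.mod_nonneg x hy; have h2 := PySem.Int.mod_lt x hy; omega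

-- Source B inner `while a % d == 0: a //= d` (it only ever runs with a ≥ 1, d ≥ 2: the guards make it total)
def divOut (a d : Nat) : Nat :=
  if h : 2 ≤ d ∧ 0 < a ∧ a % d = 0 then divOut (a / d) d else a
  termination_by a
  decreasing_by exact Nat.div_lt_self h.2.1 (by omega)

-- termination bound for the trial-division loop below
theorem divOut_le (a d : Nat) : divOut a d ≤ a := by
  fun_induction divOut with
  | case1 a h ih => exact le_trans ih (Nat.div_le_self _ _)
  | case2 a h => exact le_refl _

-- Source B outer `while d * d <= a: if a % d == 0: fs.add(d); <divide out>; d += 1`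
def trialLoop (a d : Nat) (fs : List Nat) : List Nat × Nat :=
  if h : 2 ≤ d ∧ d * d ≤ a then
    if a % d = 0 then trialLoop (divOut a d) (d + 1) (PySem.Set.add fs d)
    else trialLoop a (d + 1) fs
  else (fs, a)
  termination_by a + 1 - d
  decreasing_by
  · have h1 := divOut_le a d
    have h2 : d ≤ a := le_trans (Nat.le_mul_of_pos_left d (by omega)) h.2
    omega
  · have h2 : d ≤ a := le_trans (Nat.le_mul_of_pos_left d (by omega)) h.2
    omega

-- Source B `_prime_factors(a)`: the loop and the final `if a > 1` only act for a ≥ 2 (where Nat = int;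
-- for a ≤ 1, including negatives, both return the empty set), so the work is done on a.toNat
def trialFactors (a : Int) : List Nat :=
  if 1 < (trialLoop a.toNat 2 PySem.Set.empty).2 then
    PySem.Set.add (trialLoop a.toNat 2 PySem.Set.empty).1 (trialLoop a.toNat 2 PySem.Set.empty).2
  else (trialLoop a.toNat 2 PySem.Set.empty).1

-- body of `for i in range(n): for p in _prime_factors(a_list[i]): ...`
def seenStep (a_list : List Int) (st : List Nat × Bool) (i : Int) : List Nat × Bool :=
  (trialFactors (PySem.List.pyGetD a_list i 0)).foldl
    (fun st p => (PySem.Set.add st.1 p, st.2 || decide (p ∈ st.1))) st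

def solve_alt (n : Int) (a_list : List Int) : String :=
  match a_list with
  | [] => ""  -- Source B: a_list[0] raises IndexError here (outside Pre_solve)
  | a0 :: _ =>
    if ((PySem.List.pyRange 1 n 1).foldl
        (fun g i => pyGcdAlt g (PySem.List.pyGetD a_list i 0)) a0) ≠ 1 then "not coprime"
    else
      if ((PySem.List.pyRange 0 n 1).foldl (seenStep a_list) (PySem.Set.empty, false)).2
      then "setwise coprime" else "pairwise coprime"

-- ===== PRECONDITION & SPEC =====
-- mathematical gcd (a Nat) of the prefix of a_list that A's first loop scans
def prefixGcd (n : Int) (a_list : List Int) : Nat :=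
  ((a_list.take (max n.toNat 1)).map Int.natAbs).foldl Nat.gcd 0

-- Pre_ excludes the inputs on which A raises: the empty list, n beyond the list length, and —
-- when the prefix gcd is 1, so that the factorization part is reached — an element above the
-- 10^6 sieve bound (IndexError). The test uses the absolute gcd while A's hand-written gcd is
-- signed, so inputs whose signed gcd is -1 (possible with negative elements) that also hold an
-- element above 10^6 are conservatively excluded although both programs return 'not coprime'.
def Pre_solve (n : Int) (a_list : List Int) : Prop :=
  a_list ≠ [] ∧ n ≤ a_list.length ∧
    (prefixGcd n a_list ≠ 1 ∨ ∀ x ∈ a_list.take n.toNat, x ≤ 1000000)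
instance (n : Int) (a_list : List Int) : Decidable (Pre_solve n a_list) := by
  unfold Pre_solve; infer_instance

def pvWitness_solve : Int × List Int := (3, [2, 3, 5])

def Spec_solve (n : Int) (a_list : List Int) (out : String) : Prop := out = solve_alt n a_list
instance (n : Int) (a_list : List Int) (out : String) : Decidable (Spec_solve n a_list out) := by
  unfold Spec_solve; infer_instance

-- ===== CLAIM (what is proved, stated in full; the proofs are below) =====
def Claim_equal_solve : Prop :=
  ∀ (n : Int) (a_list : List Int), Dom_solve n a_list → Pre_solve n a_list →
    Spec_solve n a_list (solve n a_list)

-- ===== LEMMAS AND PROOFS =====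

-- the two gcd helpers are the same recursion
theorem gcdAlt_eq (x y : Int) : pyGcdAlt x y = pyGcd x y := by
  fun_induction pyGcd with
  | case1 x => rw [pyGcdAlt, if_pos rfl]
  | case2 x y h ih => rw [pyGcdAlt]; rw [if_neg h, ih]

-- |pyGcd x y| is the mathematical gcd
theorem pyGcd_natAbs (x y : Int) : (pyGcd x y).natAbs = Nat.gcd x.natAbs y.natAbs := by
  fun_induction pyGcd with
  | case1 x => simp
  | case2 x y h ih =>
    rw [ih]
    have hm : PySem.Int.mod x y = x - PySem.Int.floordiv x y * y := by
      have := PySem.Int.floordiv_mul_add_mod x y; linarith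
    have h2 : Nat.gcd y.natAbs (PySem.Int.mod x y).natAbs
        = Int.gcd y (x - PySem.Int.floordiv x y * y) := by rw [hm]; rfl
    rw [h2, sub_eq_add_neg, ← neg_mul, Int.gcd_add_mul_right_right, Int.gcd_comm]; rfl

theorem getD_setIfInBounds (a : Array Nat) (i v k : Nat) :
    (a.setIfInBounds i v).getD k 0 = if k = i ∧ i < a.size then v else a.getD k 0 := by
  rw [Array.getD_eq_getD_getElem?, Array.getD_eq_getD_getElem?, Array.getElem?_setIfInBounds]
  by_cases h : i = k
  · subst h
    by_cases hs : i < a.size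
    · simp [hs]
    · simp [hs]
  · rw [if_neg h, if_neg (fun hc => h hc.1.symm)]

theorem foldl_set_size (w : Nat) (L : List Int) : ∀ (arr : Array Nat),
    (L.foldl (fun a q => a.setIfInBounds q.toNat w) arr).size = arr.size := by
  induction L with
  | nil => intro arr; rfl
  | cons x L ih => intro arr; rw [List.foldl_cons, ih, Array.size_setIfInBounds]

theorem foldl_set_getD (w : Nat) (L : List Int) :
    ∀ (arr : Array Nat), (∀ x ∈ L, 0 ≤ x ∧ x.toNat < arr.size) → ∀ k : Nat,
      (L.foldl (fun a q => a.setIfInBounds q.toNat w) arr).getD k 0 =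
        if (k : Int) ∈ L then w else arr.getD k 0 := by
  induction L with
  | nil => intro arr _ k; simp
  | cons x L ih =>
    intro arr hb k
    rw [List.foldl_cons, ih _ (fun y hy => by
      have := hb y (List.mem_cons_of_mem _ hy); simpa [Array.size_setIfInBounds] using this)]
    rw [getD_setIfInBounds]
    have hx := hb x (List.mem_cons_self)
    by_cases hkL : (k : Int) ∈ L
    · simp [hkL]
    · by_cases hkx : (k : Int) = x
      · have hk : k = x.toNat := by omega
        rw [if_neg hkL, if_pos ⟨hk, hx.2⟩, if_pos (by simp [List.mem_cons, hkx])]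
      · have hni : ¬ (k = x.toNat ∧ x.toNat < arr.size) := by
          rintro ⟨rfl, -⟩; exact hkx (by omega)
        rw [if_neg hkL, if_neg hni, if_neg (by simp [List.mem_cons, hkx, hkL])]

theorem sieveInner_size (arr : Array Nat) (p : Nat) : (sieveInner arr p).size = arr.size :=
  foldl_set_size p _ arr

theorem sieveInner_getD (arr : Array Nat) (p : Nat) (hsz : arr.size = 1000001) (hp : 2 ≤ p)
    (k : Nat) :
    (sieveInner arr p).getD k 0 =
      if p * p ≤ k ∧ k ≤ 1000000 ∧ p ∣ k then p else arr.getD k 0 := by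
  have hps : (0 : Int) < (p : Int) := by exact_mod_cast Nat.lt_of_lt_of_le (by norm_num) hp
  have hmem : ∀ x : Int, x ∈ PySem.List.pyRange ((p : Int) * p) 1000001 p ↔
      (p : Int) * p ≤ x ∧ x < 1000001 ∧ (p : Int) ∣ x - (p : Int) * p :=
    PySem.List.mem_pyRange_iff_of_pos hps
  rw [sieveInner, foldl_set_getD p _ arr (fun x hx => by
    have := (hmem x).mp hx
    constructor
    · nlinarith [this.1]
    · have hx1 : x < 1000001 := this.2.1
      omega)]
  have hdvd : ((p : Int) ∣ (k : Int) - (p : Int) * p) ↔ (p ∣ k) := by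
    constructor
    · intro h
      have : (p : Int) ∣ (k : Int) := by
        have := dvd_add h (Dvd.intro p rfl)
        simpa using this
      exact_mod_cast this
    · intro h
      exact dvd_sub (by exact_mod_cast h) (Dvd.intro p rfl)
  by_cases hk : (k : Int) ∈ PySem.List.pyRange ((p : Int) * p) 1000001 p
  · obtain ⟨h1, h2, h3⟩ := (hmem _).mp hk
    rw [if_pos hk, if_pos ⟨by exact_mod_cast h1, by omega, hdvd.mp h3⟩]
  · rw [if_neg hk, if_neg (fun hc => hk ((hmem _).mpr
      ⟨by exact_mod_cast hc.1, by omega, hdvd.mpr hc.2.2⟩))]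

def SieveInv (arr : Array Nat) (P : Nat) : Prop :=
  arr.size = 1000001 ∧ ∀ q : Nat, q ≤ 1000000 →
    ((arr.getD q 0 = q ∧ ∀ r : Nat, r.Prime → r < P → r * r ≤ q → ¬ r ∣ q) ∨
     (Nat.Prime (arr.getD q 0) ∧ arr.getD q 0 ∣ q ∧ arr.getD q 0 < P))

theorem sieve_init : SieveInv (Array.range 1000001) 2 := by
  refine ⟨Array.size_range, fun q hq => Or.inl ⟨?_, fun r hr hr2 _ _ => ?_⟩⟩
  · rw [Array.getD_eq_getD_getElem?, Array.getElem?_range, if_pos (by omega : q < 1000001)]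
    rfl
  · exact absurd hr.two_le (by omega)
theorem sieve_cond (arr : Array Nat) (P : Nat) (hinv : SieveInv arr P) (h2 : 2 ≤ P)
    (h6 : P ≤ 1000000) : (arr.getD P 0 = P ↔ P.Prime) := by
  rcases hinv.2 P h6 with ⟨he, hno⟩ | ⟨hp, hdvd, hlt⟩
  · constructor
    · intro _
      by_contra hnp
      have hm := Nat.minFac_prime (by omega : P ≠ 1)
      have hmsq : P.minFac * P.minFac ≤ P := by
        have := Nat.minFac_sq_le_self (by omega : 0 < P) hnp
        nlinarith [this]
      have hmlt : P.minFac < P := (Nat.not_prime_iff_minFac_lt h2).mp hnp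
      exact hno P.minFac hm hmlt hmsq (Nat.minFac_dvd P)
    · intro _; exact he
  · constructor
    · intro he; rw [he] at hp; exact hp
    · intro hP
      exfalso
      rcases (Nat.Prime.eq_one_or_self_of_dvd hP _ hdvd) with h1 | h1
      · rw [h1] at hp; exact Nat.not_prime_one hp
      · omega

theorem sieve_step_prime (arr : Array Nat) (p : Nat) (hp : p.Prime)
    (hinv : SieveInv arr p) : SieveInv (sieveInner arr p) (p + 1) := by
  obtain ⟨hsz, hq⟩ := hinv
  refine ⟨by rw [sieveInner_size, hsz], fun q h6 => ?_⟩
  rw [sieveInner_getD arr p hsz hp.two_le q]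
  by_cases hc : p * p ≤ q ∧ q ≤ 1000000 ∧ p ∣ q
  · rw [if_pos hc]; exact Or.inr ⟨hp, hc.2.2, by omega⟩
  · rw [if_neg hc]
    rcases hq q h6 with ⟨he, hno⟩ | ⟨h1, h2, h3⟩
    · refine Or.inl ⟨he, fun r hr hrP hrsq hrd => ?_⟩
      rcases Nat.lt_or_ge r p with hlt | hge
      · exact hno r hr hlt hrsq hrd
      · have : r = p := by omega
        subst this
        exact hc ⟨hrsq, h6, hrd⟩
    · exact Or.inr ⟨h1, h2, by omega⟩

theorem sieve_step_skip (arr : Array Nat) (p : Nat) (hnp : ¬ p.Prime)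
    (hinv : SieveInv arr p) : SieveInv arr (p + 1) := by
  obtain ⟨hsz, hq⟩ := hinv
  refine ⟨hsz, fun q h6 => ?_⟩
  rcases hq q h6 with ⟨he, hno⟩ | ⟨h1, h2, h3⟩
  · refine Or.inl ⟨he, fun r hr hrP hrsq hrd => ?_⟩
    rcases Nat.lt_or_ge r p with hlt | hge
    · exact hno r hr hlt hrsq hrd
    · have : r = p := by omega
      subst this
      exact hnp hr
  · exact Or.inr ⟨h1, h2, by omega⟩

set_option maxRecDepth 4096 in
theorem sieve_fold : ∀ P : Nat, 2 ≤ P → P ≤ 1000 →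
    SieveInv ((PySem.List.pyRange 2 (P : Int) 1).foldl sieveStep (Array.range 1000001)) P := by
  intro P
  induction P with
  | zero => omega
  | succ P ih =>
    intro h2 hle
    rcases Nat.lt_or_ge P 2 with hP | hP
    · have : P = 1 := by omega
      subst this
      have h22 : ((1 + 1 : Nat) : Int) = 2 := by norm_num
      rw [h22]
      rw [PySem.List.pyRange_one_eq_nil (by norm_num), List.foldl_nil]
      exact sieve_init
    · have hcast : ((P : Nat) + 1 : Nat) = ((P : Int) + 1).toNat := by omega
      have hsplit : PySem.List.pyRange 2 ((P : Int) + 1) 1 =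
          PySem.List.pyRange 2 (P : Int) 1 ++ [(P : Int)] :=
        PySem.List.pyRange_one_succ_right (by exact_mod_cast hP)
      have ih2 := ih hP (by omega)
      rw [show ((P + 1 : Nat) : Int) = (P : Int) + 1 by push_cast; ring, hsplit,
        List.foldl_append]
      simp only [List.foldl_cons, List.foldl_nil]
      rw [sieveStep]
      have hcond := sieve_cond _ P ih2 hP (by omega)
      rw [Int.toNat_natCast]
      by_cases hpr : P.Prime
      · rw [if_pos (hcond.mpr hpr)]
        exact sieve_step_prime _ P hpr ih2
      · rw [if_neg (fun hcc => hpr (hcond.mp hcc))]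
        exact sieve_step_skip _ P hpr ih2

theorem sieve_spec (q : Nat) (h2 : 2 ≤ q) (h6 : q ≤ 1000000) :
    Nat.Prime (sieveA.getD q 0) ∧ sieveA.getD q 0 ∣ q := by
  have hinv : SieveInv sieveA 1000 := by
    have := sieve_fold 1000 (by norm_num) (by norm_num)
    rw [show ((1000 : Nat) : Int) = 1000 by norm_num] at this
    exact this
  rcases hinv.2 q h6 with ⟨he, hno⟩ | ⟨h1, h2', h3⟩
  · have hpr : q.Prime := by
      by_contra hnp
      have hm := Nat.minFac_prime (by omega : q ≠ 1)
      have hmsq : q.minFac * q.minFac ≤ q := by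
        have := Nat.minFac_sq_le_self (by omega : 0 < q) hnp
        nlinarith [this]
      have hmlt : q.minFac < 1000 := by
        have h1000 : q.minFac * q.minFac ≤ 1000000 := le_trans hmsq h6
        rcases Nat.lt_or_ge q.minFac 1000 with h | h
        · exact h
        · have heq : q.minFac = 1000 := by nlinarith
          rw [heq] at hm
          exact absurd hm (by norm_num)
      exact hno q.minFac hm hmlt hmsq (Nat.minFac_dvd q)
    rw [he]
    exact ⟨hpr, dvd_refl q⟩
  · exact ⟨h1, h2'⟩

theorem collect_mem : ∀ fuel a, a ≤ fuel → a ≤ 1000000 → ∀ p : Nat,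
    (p ∈ collectA sieveA fuel a ↔ p ∈ a.primeFactors) := by
  intro fuel
  induction fuel with
  | zero =>
    intro a ha _ p
    have : a = 0 := by omega
    subst this
    simp [collectA]
  | succ fuel ih =>
    intro a ha h6 p
    by_cases h : 1 < a
    · obtain ⟨hpr, hdvd⟩ := sieve_spec a (by omega) h6
      set sp := sieveA.getD a 0 with hsp
      have hsp2 : 2 ≤ sp := hpr.two_le
      have hlt : a / sp < a := Nat.div_lt_self (by omega) (by omega)
      have hpos : 0 < a / sp := Nat.div_pos (Nat.le_of_dvd (by omega) hdvd) (by omega)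
      rw [show collectA sieveA (fuel + 1) a = sp :: collectA sieveA fuel (a / sp) by
        rw [collectA, if_pos h]]
      rw [List.mem_cons, ih (a / sp) (by omega) (le_trans (Nat.div_le_self _ _) h6) p]
      have ha2 : a = sp * (a / sp) := (Nat.mul_div_cancel' hdvd).symm
      conv_rhs => rw [ha2]
      rw [Nat.primeFactors_mul (by omega) (by omega), hpr.primeFactors]
      rw [Finset.mem_union, Finset.mem_singleton]
    · rw [show collectA sieveA (fuel + 1) a = [] by rw [collectA, if_neg h]]
      interval_cases a <;> simp

theorem divOut_dvd (a d : Nat) : divOut a d ∣ a := by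
  fun_induction divOut with
  | case1 a h ih => exact dvd_trans ih (Nat.div_dvd_of_dvd (Nat.dvd_of_mod_eq_zero h.2.2))
  | case2 a h => exact dvd_refl _

theorem divOut_props (a d : Nat) (hd : 2 ≤ d) (ha : 0 < a) :
    0 < divOut a d ∧ ¬ d ∣ divOut a d := by
  fun_induction divOut with
  | case1 a h ih =>
    exact ih (Nat.div_pos (Nat.le_of_dvd h.2.1 (Nat.dvd_of_mod_eq_zero h.2.2)) (by omega))
  | case2 a h =>
    refine ⟨ha, fun hdd => h ⟨hd, ha, Nat.eq_zero_of_dvd_of_lt hdd |> fun _ => ?_⟩⟩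
    exact Nat.mod_eq_zero_of_dvd hdd

theorem divOut_primeFactors (d : Nat) (hd : d.Prime) : ∀ a, 0 < a →
    (divOut a d).primeFactors = a.primeFactors \ {d} := by
  intro a
  induction a using Nat.strong_induction_on with
  | _ a ih =>
    intro ha
    by_cases h : 2 ≤ d ∧ 0 < a ∧ a % d = 0
    · rw [show divOut a d = divOut (a / d) d by rw [divOut, dif_pos h]]
      have hdvd : d ∣ a := Nat.dvd_of_mod_eq_zero h.2.2
      have hpos : 0 < a / d := Nat.div_pos (Nat.le_of_dvd ha hdvd) (by omega)
      rw [ih (a / d) (Nat.div_lt_self ha (by omega)) hpos]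
      have ha2 : a = d * (a / d) := (Nat.mul_div_cancel' hdvd).symm
      conv_rhs => rw [ha2]
      rw [Nat.primeFactors_mul (by omega) (by omega), hd.primeFactors]
      ext x
      rw [Finset.mem_sdiff, Finset.mem_sdiff, Finset.mem_union]
      rw [Finset.mem_singleton]
      tauto
    · rw [show divOut a d = a by rw [divOut, dif_neg h]]
      have hnd : ¬ d ∣ a := fun hdd => h ⟨hd.two_le, ha, Nat.mod_eq_zero_of_dvd hdd⟩
      ext x
      rw [Finset.mem_sdiff, Finset.mem_singleton]
      constructor
      · intro hx
        exact ⟨hx, fun he => hnd (he ▸ (Nat.mem_primeFactors.mp hx).2.1)⟩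
      · exact And.left

theorem trial_spec (a d : Nat) (fs : List Nat) : 0 < a → 2 ≤ d →
    (∀ r, 2 ≤ r → r < d → ¬ r ∣ a) → fs.Nodup →
    ((if 1 < (trialLoop a d fs).2 then PySem.Set.add (trialLoop a d fs).1 (trialLoop a d fs).2
        else (trialLoop a d fs).1).Nodup ∧
     ∀ p, (p ∈ (if 1 < (trialLoop a d fs).2 then
          PySem.Set.add (trialLoop a d fs).1 (trialLoop a d fs).2 else (trialLoop a d fs).1)
        ↔ p ∈ fs ∨ p ∈ a.primeFactors)) := by
  fun_induction trialLoop with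
  | case1 a d fs h hmod ih =>
    intro ha hd hnos hnd
    have hdvd : d ∣ a := Nat.dvd_of_mod_eq_zero hmod
    have hdp : d.Prime := by
      by_contra hnp
      have hm := Nat.minFac_prime (by omega : d ≠ 1)
      exact hnos d.minFac hm.two_le ((Nat.not_prime_iff_minFac_lt hd).mp hnp)
        (dvd_trans (Nat.minFac_dvd d) hdvd)
    obtain ⟨hpos2, hnd2⟩ := divOut_props a d hd ha
    have hsf := divOut_primeFactors d hdp a ha
    have hmem_d : d ∈ a.primeFactors := Nat.mem_primeFactors.mpr ⟨hdp, hdvd, by omega⟩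
    obtain ⟨ihn, ihm⟩ := ih hpos2 (by omega)
      (fun r h2r hrd hrdvd => by
        rcases Nat.lt_or_ge r d with hlt | hge
        · exact hnos r h2r hlt (dvd_trans hrdvd (divOut_dvd a d))
        · have : r = d := by omega
          subst this
          exact hnd2 hrdvd)
      (PySem.Set.nodup_add fs d hnd)
    refine ⟨ihn, fun p => ?_⟩
    rw [ihm p, PySem.Set.mem_add, hsf, Finset.mem_sdiff, Finset.mem_singleton]
    constructor
    · rintro ((hp | rfl) | ⟨hp, -⟩)
      · exact Or.inl hp
      · exact Or.inr hmem_d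
      · exact Or.inr hp
    · rintro (hp | hp)
      · exact Or.inl (Or.inl hp)
      · by_cases he : p = d
        · subst he; exact Or.inl (Or.inr rfl)
        · exact Or.inr ⟨hp, he⟩
  | case2 a d fs h hmod ih =>
    intro ha hd hnos hnd
    refine ih ha (by omega) (fun r h2r hrd hrdvd => ?_) hnd
    rcases Nat.lt_or_ge r d with hlt | hge
    · exact hnos r h2r hlt hrdvd
    · have : r = d := by omega
      subst this
      exact absurd (Nat.mod_eq_zero_of_dvd hrdvd) hmod
  | case3 a d fs h =>
    intro ha hd hnos hnd
    by_cases h1 : 1 < a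
    · have hpr : a.Prime := by
        by_contra hnp
        have hm := Nat.minFac_prime (by omega : a ≠ 1)
        have hmsq : a.minFac * a.minFac ≤ a := by
          have := Nat.minFac_sq_le_self (by omega : 0 < a) hnp
          nlinarith [this]
        have hda : ¬ (2 ≤ d ∧ d * d ≤ a) := h
        have hlt : a.minFac < d := by
          rcases Nat.lt_or_ge a.minFac d with hx | hx
          · exact hx
          · exfalso; exact hda ⟨hd, le_trans (Nat.mul_le_mul hx hx) hmsq⟩
        exact hnos a.minFac hm.two_le hlt (Nat.minFac_dvd a)
      rw [if_pos h1]
      refine ⟨PySem.Set.nodup_add fs a hnd, fun p => ?_⟩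
      rw [PySem.Set.mem_add, hpr.primeFactors, Finset.mem_singleton]
    · have ha1 : a = 1 := by omega
      subst ha1
      rw [if_neg h1]
      refine ⟨hnd, fun p => ?_⟩
      simp

theorem trialFactors_spec (x : Int) :
    (trialFactors x).Nodup ∧ ∀ p, (p ∈ trialFactors x ↔ p ∈ x.toNat.primeFactors) := by
  rcases Nat.eq_zero_or_pos x.toNat with h0 | hpos
  · rw [trialFactors, h0]
    rw [show trialLoop 0 2 PySem.Set.empty = (PySem.Set.empty, 0) by
      rw [trialLoop, dif_neg (by omega)]]
    simp [PySem.Set.empty]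
  · have h := trial_spec x.toNat 2 PySem.Set.empty hpos (le_refl 2) (fun r h2 hlt => by omega)
      List.nodup_nil
    rw [trialFactors]
    refine ⟨h.1, fun p => ?_⟩
    rw [h.2 p]
    simp [PySem.Set.empty]

def PFi (a_list : List Int) (i : Int) : Finset Nat :=
  (PySem.List.pyGetD a_list i 0).toNat.primeFactors

theorem inc_fold_size (L : List Nat) : ∀ c : Array Nat,
    (L.foldl (fun c p => c.setIfInBounds p (c.getD p 0 + 1)) c).size = c.size := by
  induction L with
  | nil => intro c; rfl
  | cons x L ih => intro c; rw [List.foldl_cons, ih, Array.size_setIfInBounds]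

theorem inc_fold_getD (L : List Nat) : ∀ (c : Array Nat), L.Nodup → ∀ k : Nat,
    (L.foldl (fun c p => c.setIfInBounds p (c.getD p 0 + 1)) c).getD k 0 =
      c.getD k 0 + (if k ∈ L ∧ k < c.size then 1 else 0) := by
  induction L with
  | nil => intro c _ k; simp
  | cons x L ih =>
    intro c hnd k
    rw [List.foldl_cons, ih _ hnd.of_cons k, getD_setIfInBounds, Array.size_setIfInBounds]
    have hxL : x ∉ L := (List.nodup_cons.mp hnd).1
    by_cases hkx : k = x
    · subst hkx
      by_cases hks : k < c.size
      · rw [if_pos ⟨rfl, hks⟩, if_neg (fun hc => hxL hc.1), if_pos ⟨List.mem_cons_self, hks⟩]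
      · rw [if_neg (fun hc => hks hc.2), if_neg (fun hc => hxL hc.1),
          if_neg (fun hc => hks hc.2)]
    · rw [if_neg (fun hc => hkx hc.1)]
      by_cases hkL : k ∈ L ∧ k < c.size
      · rw [if_pos hkL, if_pos ⟨List.mem_cons_of_mem _ hkL.1, hkL.2⟩]
      · rw [if_neg hkL, if_neg (fun hc => hkL ⟨(List.mem_cons.mp hc.1).resolve_left hkx, hc.2⟩)]

def CntInv (a_list : List Int) (K : List Int) (c : Array Nat) : Prop :=
  c.size = 1000001 ∧ ∀ p : Nat,
    (1 ≤ c.getD p 0 ↔ ∃ i ∈ K, p ∈ PFi a_list i) ∧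
    (2 ≤ c.getD p 0 ↔ ∃ i ∈ K, ∃ j ∈ K, i ≠ j ∧ p ∈ PFi a_list i ∧ p ∈ PFi a_list j)

theorem cnt_step (a_list : List Int) (K : List Int) (c : Array Nat) (i : Int)
    (hiK : i ∉ K) (hb : PySem.List.pyGetD a_list i 0 ≤ 1000000)
    (hc : CntInv a_list K c) : CntInv a_list (K ++ [i]) (countStep a_list c i) := by
  obtain ⟨hsz, hinv⟩ := hc
  set a := PySem.List.pyGetD a_list i 0 with ha
  have h6 : a.toNat ≤ 1000000 := by omega
  set L := PySem.Set.ofList (collectA sieveA a.toNat a.toNat) with hL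
  have hLn : L.Nodup := PySem.Set.nodup_ofList _
  have hLmem : ∀ p, p ∈ L ↔ p ∈ PFi a_list i := by
    intro p
    rw [hL, PySem.Set.mem_ofList, collect_mem _ _ (le_refl _) h6 p]
    rfl
  have hLlt : ∀ p ∈ L, p < c.size := by
    intro p hp
    obtain ⟨hpr, hdvd, hne⟩ := Nat.mem_primeFactors.mp ((hLmem p).mp hp)
    have := Nat.le_of_dvd (Nat.pos_of_ne_zero hne) hdvd
    omega
  constructor
  · rw [countStep, ← hL, inc_fold_size, hsz]
  · intro p
    rw [countStep, ← hL, inc_fold_getD L c hLn p]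
    have hmemiff : (p ∈ L ∧ p < c.size) ↔ p ∈ PFi a_list i := by
      constructor
      · intro hp; exact (hLmem p).mp hp.1
      · intro hp
        have : p ∈ L := (hLmem p).mpr hp
        exact ⟨this, hLlt p this⟩
    obtain ⟨h1, h2⟩ := hinv p
    by_cases hpi : p ∈ PFi a_list i
    · rw [if_pos (hmemiff.mpr hpi)]
      constructor
      · exact ⟨fun _ => ⟨i, by simp, hpi⟩, fun _ => by omega⟩
      · constructor
        · intro hge
          have : 1 ≤ c.getD p 0 := by omega
          obtain ⟨i', hi', hpi'⟩ := h1.mp this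
          exact ⟨i', by simp [hi'], i, by simp, fun he => hiK (he ▸ hi'), hpi', hpi⟩
        · rintro ⟨x, hx, y, hy, hxy, hpx, hpy⟩
          simp only [List.mem_append, List.mem_singleton] at hx hy
          rcases hx with hx | rfl
          · have : 1 ≤ c.getD p 0 := h1.mpr ⟨x, hx, hpx⟩
            omega
          · rcases hy with hy | rfl
            · have : 1 ≤ c.getD p 0 := h1.mpr ⟨y, hy, hpy⟩
              omega
            · exact absurd rfl hxy
    · rw [if_neg (fun hc => hpi (hmemiff.mp hc))]
      constructor
      · rw [Nat.add_zero, h1]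
        constructor
        · rintro ⟨x, hx, hpx⟩; exact ⟨x, by simp [hx], hpx⟩
        · rintro ⟨x, hx, hpx⟩
          simp only [List.mem_append, List.mem_singleton] at hx
          rcases hx with hx | rfl
          · exact ⟨x, hx, hpx⟩
          · exact absurd hpx hpi
      · rw [Nat.add_zero, h2]
        constructor
        · rintro ⟨x, hx, y, hy, hxy, hpx, hpy⟩
          exact ⟨x, by simp [hx], y, by simp [hy], hxy, hpx, hpy⟩
        · rintro ⟨x, hx, y, hy, hxy, hpx, hpy⟩
          simp only [List.mem_append, List.mem_singleton] at hx hy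
          rcases hx with hx | rfl
          · rcases hy with hy | rfl
            · exact ⟨x, hx, y, hy, hxy, hpx, hpy⟩
            · exact absurd hpy hpi
          · exact absurd hpx hpi

theorem cnt_loop (a_list : List Int) (R : List Int) : ∀ (K : List Int) (c : Array Nat),
    (K ++ R).Nodup → (∀ i ∈ R, PySem.List.pyGetD a_list i 0 ≤ 1000000) →
    CntInv a_list K c → CntInv a_list (K ++ R) (R.foldl (countStep a_list) c) := by
  induction R with
  | nil => intro K c _ _ hc; simpa using hc
  | cons i R ih =>
    intro K c hnd hb hc
    rw [List.append_cons] at hnd ⊢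
    rw [List.foldl_cons]
    refine ih (K ++ [i]) _ hnd (fun j hj => hb j (List.mem_cons_of_mem _ hj)) ?_
    refine cnt_step a_list K c i ?_ (hb i List.mem_cons_self) hc
    have h1 : (K ++ [i]).Nodup := List.Nodup.sublist (List.sublist_append_left _ _) hnd
    intro hiK
    rcases List.nodup_append.mp h1 with ⟨-, -, hdisj⟩
    exact hdisj i hiK i (List.mem_singleton_self i) rfl

theorem seen_fold (L : List Nat) : ∀ (st : List Nat × Bool), L.Nodup →
    (L.foldl (fun st p => (PySem.Set.add st.1 p, st.2 || decide (p ∈ st.1))) st) =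
      (PySem.Set.update st.1 L, st.2 || L.any (fun p => decide (p ∈ st.1))) := by
  induction L with
  | nil => intro st _; simp [PySem.Set.update_nil]
  | cons x L ih =>
    intro st hnd
    rw [List.foldl_cons, ih _ hnd.of_cons]
    have hxL : x ∉ L := (List.nodup_cons.mp hnd).1
    have hany : L.any (fun p => decide (p ∈ PySem.Set.add st.1 x))
        = L.any (fun p => decide (p ∈ st.1)) := by
      refine PySem.List.any_congr_mem (fun p hp => ?_)
      rw [decide_eq_decide, PySem.Set.mem_add]
      constructor
      · rintro (h | rfl)
        · exact h
        · exact absurd hp hxL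
      · exact Or.inl
    rw [PySem.Set.update_cons]
    simp only [hany, List.any_cons, Bool.or_assoc]

def SharedAfter (a_list : List Int) (K : List Int) : Prop :=
  ∃ i ∈ K, ∃ j ∈ K, i ≠ j ∧ ∃ p : Nat, p ∈ PFi a_list i ∧ p ∈ PFi a_list j

def BInv (a_list : List Int) (K : List Int) (st : List Nat × Bool) : Prop :=
  st.1.Nodup ∧ (∀ p, p ∈ st.1 ↔ ∃ i ∈ K, p ∈ PFi a_list i) ∧
    (st.2 = true ↔ SharedAfter a_list K)

theorem b_step (a_list : List Int) (K : List Int) (st : List Nat × Bool) (i : Int)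
    (hiK : i ∉ K) (hs : BInv a_list K st) : BInv a_list (K ++ [i]) (seenStep a_list st i) := by
  obtain ⟨hnd, hmem, hsh⟩ := hs
  have hT := trialFactors_spec (PySem.List.pyGetD a_list i 0)
  have hTm : ∀ p, p ∈ trialFactors (PySem.List.pyGetD a_list i 0) ↔ p ∈ PFi a_list i := hT.2
  rw [seenStep, seen_fold _ st hT.1]
  refine ⟨PySem.Set.nodup_update st.1 _ hnd, fun p => ?_, ?_⟩
  · rw [PySem.Set.mem_update, hmem p]
    constructor
    · rintro (⟨x, hx, hpx⟩ | hp)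
      · exact ⟨x, by simp [hx], hpx⟩
      · exact ⟨i, by simp, (hTm p).mp hp⟩
    · rintro ⟨x, hx, hpx⟩
      simp only [List.mem_append, List.mem_singleton] at hx
      rcases hx with hx | rfl
      · exact Or.inl ⟨x, hx, hpx⟩
      · exact Or.inr ((hTm p).mpr hpx)
  · rw [Bool.or_eq_true, List.any_eq_true, hsh]
    constructor
    · rintro (hshared | ⟨p, hpT, hpseen⟩)
      · obtain ⟨x, hx, y, hy, hxy, hp⟩ := hshared
        exact ⟨x, by simp [hx], y, by simp [hy], hxy, hp⟩
      · rw [decide_eq_true_eq, hmem p] at hpseen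
        obtain ⟨x, hx, hpx⟩ := hpseen
        exact ⟨x, by simp [hx], i, by simp, fun he => hiK (he ▸ hx), p, hpx, (hTm p).mp hpT⟩
    · rintro ⟨x, hx, y, hy, hxy, p, hpx, hpy⟩
      simp only [List.mem_append, List.mem_singleton] at hx hy
      rcases hx with hx | rfl
      · rcases hy with hy | rfl
        · exact Or.inl ⟨x, hx, y, hy, hxy, p, hpx, hpy⟩
        · exact Or.inr ⟨p, (hTm p).mpr hpy, by rw [decide_eq_true_eq, hmem p]; exact ⟨x, hx, hpx⟩⟩
      · rcases hy with hy | rfl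
        · exact Or.inr ⟨p, (hTm p).mpr hpx, by rw [decide_eq_true_eq, hmem p]; exact ⟨y, hy, hpy⟩⟩
        · exact absurd rfl hxy

theorem b_loop (a_list : List Int) (R : List Int) : ∀ (K : List Int) (st : List Nat × Bool),
    (K ++ R).Nodup → BInv a_list K st →
    BInv a_list (K ++ R) (R.foldl (seenStep a_list) st) := by
  induction R with
  | nil => intro K st _ hs; simpa using hs
  | cons i R ih =>
    intro K st hnd hs
    rw [List.append_cons] at hnd ⊢
    rw [List.foldl_cons]
    refine ih (K ++ [i]) _ hnd (b_step a_list K st i ?_ hs)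
    have h1 : (K ++ [i]).Nodup := List.Nodup.sublist (List.sublist_append_left _ _) hnd
    intro hiK
    rcases List.nodup_append.mp h1 with ⟨-, -, hdisj⟩
    exact hdisj i hiK i (List.mem_singleton_self i) rfl

theorem max_fold_ge_two (c : Array Nat) :
    (1 < c.foldl max 0) ↔ ∃ p : Nat, 2 ≤ c.getD p 0 := by
  rw [← Array.foldl_toList]
  constructor
  · intro h
    rcases PySem.List.foldl_max_mem c.toList 0 with he | hm
    · rw [he] at h; omega
    · obtain ⟨k, hk, hke⟩ := List.mem_iff_getElem.mp hm
      refine ⟨k, ?_⟩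
      rw [Array.getD_eq_getD_getElem?, Array.getElem?_eq_getElem (by simpa using hk)]
      simp only [Option.getD_some]
      rw [← Array.getElem_toList (by simpa using hk)] at *
      omega
  · rintro ⟨p, hp⟩
    have hlt : p < c.size := by
      by_contra hge
      rw [Array.getD_eq_getD_getElem?, Array.getElem?_eq_none (by omega)] at hp
      simp at hp
    have hmem : c.getD p 0 ∈ c.toList := by
      rw [Array.getD_eq_getD_getElem?, Array.getElem?_eq_getElem hlt]
      simp only [Option.getD_some]
      rw [← Array.getElem_toList (by simpa using hlt)]
      exact List.getElem_mem _
    have := (PySem.List.le_foldl_max c.toList 0).2 _ hmem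
    omega

theorem r_natAbs (n : Int) (a0 : Int) (tl : List Int) (hn : n ≤ (a0 :: tl).length) :
    ((PySem.List.pyRange 1 n 1).foldl
        (fun r i => pyGcd r (PySem.List.pyGetD (a0 :: tl) i 0)) a0).natAbs
      = prefixGcd n (a0 :: tl) := by
  by_cases h1 : n ≤ 1
  · rw [PySem.List.pyRange_one_eq_nil h1, List.foldl_nil, prefixGcd]
    have : max n.toNat 1 = 1 := by omega
    rw [this]
    simp [Nat.gcd_comm]
  · have hgen : ∀ k : Nat, 1 ≤ k → k ≤ (a0 :: tl).length →
        ((PySem.List.pyRange 1 (k : Int) 1).foldl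
            (fun r i => pyGcd r (PySem.List.pyGetD (a0 :: tl) i 0)) a0).natAbs
          = (((a0 :: tl).take k).map Int.natAbs).foldl Nat.gcd 0 := by
      intro k hk1
      induction k, hk1 using Nat.le_induction with
      | base =>
        intro _
        rw [show ((1 : Nat) : Int) = 1 by norm_num, PySem.List.pyRange_one_eq_nil (le_refl 1),
          List.foldl_nil]
        simp [Nat.gcd_comm]
      | succ k hk ih =>
        intro hlen
        have hkl : k < (a0 :: tl).length := by omega
        rw [show ((k + 1 : Nat) : Int) = (k : Int) + 1 by push_cast; ring,
          PySem.List.pyRange_one_succ_right (by exact_mod_cast hk : (1 : Int) ≤ (k : Int)),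
          List.foldl_append, List.foldl_cons, List.foldl_nil]
        rw [pyGcd_natAbs, ih (by omega)]
        have hget : PySem.List.pyGetD (a0 :: tl) ((k : Nat) : Int) 0 = (a0 :: tl)[k] := by
          rw [PySem.List.pyGetD_natCast]
          exact List.getD_eq_getElem _ _ hkl
        rw [hget, List.take_add_one, List.getElem?_eq_getElem hkl]
        simp only [Option.toList_some, List.map_append, List.map_cons, List.map_nil,
          List.foldl_append, List.foldl_cons, List.foldl_nil]
    have hn1 : n = ((n.toNat : Nat) : Int) := by omega
    have hmax : max n.toNat 1 = n.toNat := by omega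
    rw [prefixGcd, hmax, hn1]
    exact hgen n.toNat (by omega) (by omega)

theorem final_assembly (n : Int) (a_list : List Int)
    (hpre : a_list ≠ [] ∧ n ≤ a_list.length ∧
      (prefixGcd n a_list ≠ 1 ∨ ∀ x ∈ a_list.take n.toNat, x ≤ 1000000)) :
    solve n a_list = solve_alt n a_list := by
  obtain ⟨hne, hlen, hdisj⟩ := hpre
  match a_list, hne with
  | a0 :: tl, _ =>
  rw [solve, solve_alt]
  simp only [gcdAlt_eq]
  set al := a0 :: tl with hal
  set r := (PySem.List.pyRange 1 n 1).foldl
      (fun r i => pyGcd r (PySem.List.pyGetD al i 0)) a0 with hr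
  by_cases h1 : r = 1
  · rw [if_neg (not_not_intro h1), if_neg (not_not_intro h1)]
    have hpg : prefixGcd n al = 1 := by
      rw [← r_natAbs n a0 tl (by simpa using hlen), ← hr, h1]
      rfl
    have hbnd : ∀ x ∈ al.take n.toNat, x ≤ 1000000 := hdisj.resolve_left (by simp [hpg])
    have hbR : ∀ i ∈ PySem.List.pyRange 0 n 1, PySem.List.pyGetD al i 0 ≤ 1000000 := by
      intro i hi
      obtain ⟨hi0, hin⟩ := PySem.List.mem_pyRange_one.mp hi
      have hilen : i < (al.length : Int) := lt_of_lt_of_le hin hlen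
      have hgi : PySem.List.pyGetD al i 0 = al[i.toNat]'(by omega) :=
        PySem.List.pyGetD_eq_getElem al 0 hi0 (by simpa using hilen)
      rw [hgi]
      refine hbnd _ ?_
      have hlt : i.toNat < n.toNat := by omega
      have : (al.take n.toNat)[i.toNat]'(by
          rw [List.length_take]; omega) = al[i.toNat]'(by omega) := by
        exact List.getElem_take
      rw [← this]
      exact List.getElem_mem _
    have hcnt := cnt_loop al (PySem.List.pyRange 0 n 1) [] (Array.replicate 1000001 0)
      (by simpa using PySem.List.nodup_pyRange_one 0 n) hbR
      ⟨Array.size_replicate, fun p => by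
        have hz : (Array.replicate 1000001 (0 : Nat)).getD p 0 = 0 := by
          rw [Array.getD_eq_getD_getElem?]
          rcases Nat.lt_or_ge p 1000001 with hp | hp
          · rw [Array.getElem?_eq_getElem (by simpa using hp)]
            simp [Array.getElem_replicate]
          · rw [Array.getElem?_eq_none (by simpa using hp)]
            rfl
        rw [hz]
        constructor
        · constructor
          · intro hc; omega
          · rintro ⟨i, hi, -⟩; exact absurd hi (List.not_mem_nil)
        · constructor
          · intro hc; omega
          · rintro ⟨i, hi, -⟩; exact absurd hi (List.not_mem_nil)⟩
    have hst := b_loop al (PySem.List.pyRange 0 n 1) [] (PySem.Set.empty, false)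
      (by simpa using PySem.List.nodup_pyRange_one 0 n)
      ⟨List.nodup_nil, fun p => by
        constructor
        · intro hp; exact absurd hp (List.not_mem_nil)
        · rintro ⟨i, hi, -⟩; exact absurd hi (List.not_mem_nil),
       by
        constructor
        · intro hc; exact absurd hc (by simp)
        · rintro ⟨i, hi, -⟩; exact absurd hi (List.not_mem_nil)⟩
    rw [List.nil_append] at hcnt hst
    obtain ⟨hsz, hcinv⟩ := hcnt
    obtain ⟨-, -, hshiff⟩ := hst
    have hiff : (1 < ((PySem.List.pyRange 0 n 1).foldl (countStep al)
        (Array.replicate 1000001 0)).foldl max 0) ↔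
        ((PySem.List.pyRange 0 n 1).foldl (seenStep al) (PySem.Set.empty, false)).2 = true := by
      rw [max_fold_ge_two, hshiff]
      constructor
      · rintro ⟨p, hp⟩
        obtain ⟨i, hi, j, hj, hij, hpi, hpj⟩ := (hcinv p).2.mp hp
        exact ⟨i, hi, j, hj, hij, p, hpi, hpj⟩
      · rintro ⟨i, hi, j, hj, hij, p, hpi, hpj⟩
        exact ⟨p, (hcinv p).2.mpr ⟨i, hi, j, hj, hij, hpi, hpj⟩⟩
    by_cases hsw : ((PySem.List.pyRange 0 n 1).foldl (seenStep al) (PySem.Set.empty, false)).2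
    · rw [if_pos (hiff.mpr hsw), if_pos hsw]
    · rw [if_neg (fun hc => hsw (hiff.mp hc)), if_neg (by simpa using hsw)]
  · rw [if_pos h1, if_pos h1]

-- ===== VERDICT (by name: the statement is the Claim_ definition above) =====
theorem solve_spec : Claim_equal_solve := by
  intro n a_list hdom hpre
  unfold Spec_solve
  exact final_assembly n a_list hpre
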